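-- pv_equiv track=rewrite | github.com/JonathanGuardado/agent-system | src/ticket_agent/jira/fake_client.py | _quoted_terms_after
-- ===== SOURCE A (Python) =====
-- def _quoted_terms_after(text: str, marker: str) -> list[str]:
--     values: list[str] = []
--     start = 0
--     while True:
--         index = text.find(marker, start)
--         if index < 0:
--             return values
--         quote_start = text.find('"', index + len(marker))
--         if quote_start < 0:
--             return values
--         quote_end = text.find('"', quote_start + 1)
--         if quote_end < 0:
--             return values
--         values.append(text[quote_start + 1 : quote_end])
--         start = quote_end + 1
-- ===== SOURCE B (Python) =====
-- import re
--
--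
-- def _quoted_terms_after(text: str, marker: str) -> list[str]:
--     return re.findall(re.escape(marker) + r'[^"]*"([^"]*)"', text)
-- ===== Notes on version B (the rewrite author's own statement) =====
-- stated objective: idiomatic
-- what changed: Replaced the manual three-find index-bookkeeping loop with a single compiled regular expression: re.findall(re.escape(marker) + r'[^"]*"([^"]*)"', text) extracts all captures in one scan.
import Mathlib
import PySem

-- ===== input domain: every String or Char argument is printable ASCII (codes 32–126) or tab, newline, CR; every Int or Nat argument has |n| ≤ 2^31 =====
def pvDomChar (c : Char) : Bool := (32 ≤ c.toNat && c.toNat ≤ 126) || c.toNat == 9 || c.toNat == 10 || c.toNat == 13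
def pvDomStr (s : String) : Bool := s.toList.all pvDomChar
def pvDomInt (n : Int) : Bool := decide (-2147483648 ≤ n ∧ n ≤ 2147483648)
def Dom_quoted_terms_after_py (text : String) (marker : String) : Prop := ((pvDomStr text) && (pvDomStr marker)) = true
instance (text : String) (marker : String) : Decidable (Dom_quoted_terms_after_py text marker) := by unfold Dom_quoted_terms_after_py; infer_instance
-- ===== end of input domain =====

-- B replaces A's manual three-`find` index-bookkeeping loop with a single regular-expression
-- scan (re.findall of marker[^"]*"([^"]*)"); ported here as a leftmost-match scanner.


-- ===== PORT A =====
-- A's while-loop over the start index; the fuel argument only makes the recursion structural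
-- (start strictly increases and search from start > len fails, so fuel = len + 1 is never exhausted).
def pvLoopA (t m : List Char) : Nat → List String → Nat → List String
  | 0, values, _ => values
  | fuel + 1, values, start =>
    let index := PySem.Chars.findFrom t m (start : Int)
    if index < 0 then values else
    let quoteStart := PySem.Chars.findFrom t ['"'] (index + m.length)
    if quoteStart < 0 then values else
    let quoteEnd := PySem.Chars.findFrom t ['"'] (quoteStart + 1)
    if quoteEnd < 0 then values else
    pvLoopA t m fuel
      (values ++ [String.ofList (PySem.Chars.slice t (some (quoteStart + 1)) (some quoteEnd))])
      (quoteEnd.toNat + 1)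

def quoted_terms_after_py (text : String) (marker : String) : List String :=
  pvLoopA text.toList marker.toList (text.toList.length + 1) [] 0

-- ===== PORT B =====
-- Hand port of re.findall(re.escape(marker) + r'[^"]*"([^"]*)"', text): exact for this pattern,
-- because [^"]* followed by '"' deterministically stops at the first '"' (no backtracking choice),
-- matches are leftmost and non-overlapping, and every match is nonempty (it contains two quotes).
def pvTryMatch (m cs : List Char) : Option (List Char × List Char) :=
  if m.isPrefixOf cs then
    -- `[^"]*"`: dropWhile stops exactly at the first '"', so a nonempty remainder
    -- starts with '"' (the matched quote); an empty remainder means no '"' = no match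
    match (cs.drop m.length).dropWhile (fun c => c ≠ '"') with
    | [] => none
    | _ :: r3 =>
      match r3.dropWhile (fun c => c ≠ '"') with
      | [] => none
      | _ :: r4 => some (r3.takeWhile (fun c => c ≠ '"'), r4)
  else none

theorem pvTryMatch_lt {m cs : List Char} {cap rest : List Char}
    (h : pvTryMatch m cs = some (cap, rest)) : rest.length < cs.length := by
  unfold pvTryMatch at h
  split at h
  · split at h
    · simp at h
    · rename_i c3 r3 h2
      split at h
      · simp at h
      · rename_i c4 r4 h3
        simp only [Option.some.injEq, Prod.mk.injEq] at h
        obtain ⟨-, hr⟩ := h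
        subst hr
        have l3 : (c3 :: r3).length ≤ (cs.drop m.length).length := by
          rw [← h2]; exact List.length_dropWhile_le _ _
        have l4 : (c4 :: r4).length ≤ r3.length := by
          rw [← h3]; exact List.length_dropWhile_le _ _
        have : (cs.drop m.length).length ≤ cs.length := by simp
        simp only [List.length_cons] at l3 l4
        omega
  · simp at h

def pvFindAll (m : List Char) (cs : List Char) : List String :=
  match h : pvTryMatch m cs with
  | some (cap, rest) => String.ofList cap :: pvFindAll m rest
  | none =>
    match cs with
    | [] => []
    | _ :: t => pvFindAll m t
termination_by cs.length
decreasing_by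
  · exact pvTryMatch_lt h
  · simp

def quoted_terms_after_py_alt (text : String) (marker : String) : List String :=
  pvFindAll marker.toList text.toList

-- ===== PRECONDITION & SPEC =====
def Spec_quoted_terms_after_py (text : String) (marker : String) (out : List String) : Prop := out = quoted_terms_after_py_alt text marker
instance (text : String) (marker : String) (out : List String) : Decidable (Spec_quoted_terms_after_py text marker out) := by unfold Spec_quoted_terms_after_py; infer_instance

-- ===== CLAIM (what is proved, stated in full; the proofs are below) =====
def Claim_equal_quoted_terms_after_py : Prop := ∀ (text : String) (marker : String), Dom_quoted_terms_after_py text marker → Spec_quoted_terms_after_py text marker (quoted_terms_after_py text marker)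

-- ===== LEMMAS AND PROOFS =====

theorem pvFindAll_some {m cs cap rest : List Char} (h : pvTryMatch m cs = some (cap, rest)) :
    pvFindAll m cs = String.ofList cap :: pvFindAll m rest := by
  rw [pvFindAll]; split
  · rename_i cap' rest' h'
    rw [h] at h'; injection h' with h'; injection h' with h1 h2; subst h1; subst h2; rfl
  · rename_i h'; rw [h] at h'; simp at h'

theorem pvFindAll_nil (m : List Char) : pvFindAll m [] = [] := by
  rw [pvFindAll]; split
  · rename_i cap rest h
    exfalso
    have := pvTryMatch_lt h
    simp at this
  · rfl

theorem pvFindAll_cons_none {m : List Char} {c : Char} {t : List Char}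
    (h : pvTryMatch m (c :: t) = none) : pvFindAll m (c :: t) = pvFindAll m t := by
  rw [pvFindAll]; split
  · rename_i cap rest h'; rw [h] at h'; exact absurd h' (by simp)
  · rfl

theorem pvTryMatch_none_of_not_prefix {m cs : List Char} (h : ¬ m <+: cs) :
    pvTryMatch m cs = none := by
  unfold pvTryMatch
  rw [if_neg]
  rwa [List.isPrefixOf_iff_prefix]

theorem dropWhile_quote_head {xs r : List Char} {c : Char}
    (h : xs.dropWhile (fun c => c ≠ '"') = c :: r) : c = '"' := by
  induction xs with
  | nil => simp at h
  | cons a t ih =>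
    rw [List.dropWhile_cons] at h
    by_cases ha : a = '"'
    · rw [if_neg (by simp [ha])] at h
      exact ((List.cons.injEq _ _ _ _).mp h).1.symm.trans ha
    · rw [if_pos (by simp [ha])] at h
      exact ih h

-- a successful match consumes two quotes after the marker
theorem pvTryMatch_some_two_quotes {m cs : List Char} {x : List Char × List Char}
    (h : pvTryMatch m cs = some x) : 2 ≤ (cs.drop m.length).count '"' := by
  unfold pvTryMatch at h
  split at h
  · split at h
    · simp at h
    · rename_i c3 r3 h2
      split at h
      · simp at h
      · rename_i c4 r4 h3
        obtain rfl := dropWhile_quote_head h2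
        obtain rfl := dropWhile_quote_head h3
        have s3 : ('"' :: r3) <:+ cs.drop m.length := h2 ▸ List.dropWhile_suffix _
        have s4 : ('"' :: r4) <:+ r3 := h3 ▸ List.dropWhile_suffix _
        have c4 : ('"' :: r4).count '"' ≤ r3.count '"' := s4.sublist.count_le _
        have c3 : ('"' :: r3).count '"' ≤ (cs.drop m.length).count '"' := s3.sublist.count_le _
        simp only [List.count_cons_self] at c3 c4
        omega
  · simp at h

theorem pvFindAll_eq_nil (m cs : List Char) (h : ∀ p, pvTryMatch m (cs.drop p) = none) :
    pvFindAll m cs = [] := by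
  induction cs with
  | nil => exact pvFindAll_nil m
  | cons c t ih =>
    rw [pvFindAll_cons_none (by simpa using h 0)]
    exact ih (fun p => by simpa using h (p + 1))

theorem pvFindAll_skip (m : List Char) (p : Nat) :
    ∀ cs : List Char, (∀ i < p, ¬ m <+: cs.drop i) → pvFindAll m cs = pvFindAll m (cs.drop p) := by
  induction p with
  | zero => intro cs _; simp
  | succ p ih =>
    intro cs h
    match cs with
    | [] => simp
    | c :: t =>
      rw [pvFindAll_cons_none (pvTryMatch_none_of_not_prefix (by simpa using h 0 (by omega)))]
      rw [ih t (fun i hi => by simpa using h (i + 1) (by omega))]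
      rfl

-- first-occurrence index characterises takeWhile/dropWhile on the non-quote predicate
theorem tw_dw (xs : List Char) (n : Nat) (hn : xs[n]? = some '"')
    (hmin : ∀ i < n, xs[i]? ≠ some '"') :
    xs.takeWhile (fun c => c ≠ '"') = xs.take n ∧ xs.dropWhile (fun c => c ≠ '"') = xs.drop n := by
  induction xs generalizing n with
  | nil => simp at hn
  | cons c t ih =>
    cases n with
    | zero =>
      simp only [List.getElem?_cons_zero, Option.some.injEq] at hn
      subst hn
      constructor
      · simp [List.takeWhile]
      · simp [List.dropWhile]
    | succ n =>
      have hc : c ≠ '"' := by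
        intro hc; exact hmin 0 (by omega) (by simp [hc])
      have := ih n (by simpa using hn) (fun i hi => by
        have := hmin (i + 1) (by omega); simpa using this)
      refine ⟨?_, ?_⟩
      · rw [List.takeWhile_cons, if_pos (by simp [hc]), List.take_succ_cons, this.1]
      · rw [List.dropWhile_cons, if_pos (by simp [hc]), List.drop_succ_cons]
        exact this.2

theorem singleton_prefix_iff (a : Char) (l : List Char) : [a] <+: l ↔ l.head? = some a := by
  cases l with
  | nil => simp
  | cons c t =>
    constructor
    · intro ⟨r, hr⟩
      simp only [List.singleton_append, List.cons.injEq] at hr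
      simp [hr.1]
    · intro h
      simp only [List.head?_cons, Option.some.injEq] at h
      exact ⟨t, by simp [h]⟩


theorem prefix_drop_infix {m cs : List Char} {p : Nat} (h : m <+: cs.drop p) : m <:+: cs := by
  obtain ⟨r, hr⟩ := h
  obtain ⟨s, hs⟩ := List.drop_suffix p cs
  exact ⟨s, r, by rw [List.append_assoc, hr, hs]⟩

theorem count_quote_zero {xs : List Char} (h : PySem.Chars.find xs ['"'] = -1) :
    xs.count '"' = 0 := by
  have hni : ¬ (['"'] : List Char) <:+: xs := (PySem.Chars.find_eq_neg_one_iff _ _).mp h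
  rw [List.count_eq_zero]
  intro hm
  obtain ⟨s, tl, hst⟩ := List.append_of_mem hm
  exact hni ⟨s, tl, by rw [hst]; simp⟩

-- find on the singleton quote, in indexed form
theorem quote_facts (xs : List Char) {u : Nat} (h : PySem.Chars.find xs ['"'] = (u : Int)) :
    xs[u]? = some '"' ∧ ∀ i < u, xs[i]? ≠ some '"' := by
  have h0 : 0 ≤ PySem.Chars.find xs ['"'] := by rw [h]; positivity
  obtain ⟨hp, hmin⟩ := PySem.Chars.find_spec h0
  rw [h] at hp hmin
  simp only [Int.toNat_natCast] at hp hmin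
  constructor
  · have := (singleton_prefix_iff '"' (xs.drop u)).mp hp
    rwa [List.head?_drop] at this
  · intro i hi hcontra
    refine hmin i hi ((singleton_prefix_iff '"' (xs.drop i)).mpr ?_)
    rwa [List.head?_drop]

theorem drop_idx_cons {xs : List Char} {u : Nat} {a : Char} (h : xs[u]? = some a) :
    xs.drop u = a :: xs.drop (u + 1) := by
  have hlt : u < xs.length := by
    by_contra hge
    rw [List.getElem?_eq_none (by omega)] at h
    exact absurd h (by simp)
  rw [List.drop_eq_getElem_cons hlt]
  have : xs[u] = a := by
    have := List.getElem?_eq_getElem hlt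
    rw [h] at this
    exact (Option.some.injEq _ _ ▸ this.symm)
  rw [this]

theorem count_quote_one {xs : List Char} {u : Nat} (hu : xs[u]? = some '"')
    (hmin : ∀ i < u, xs[i]? ≠ some '"') (h2 : (xs.drop (u + 1)).count '"' = 0) :
    xs.count '"' = 1 := by
  obtain ⟨htw, hdw⟩ := tw_dw xs u hu hmin
  have hx : xs = xs.take u ++ xs.drop u := (List.take_append_drop u xs).symm
  have hdu : xs.drop u = '"' :: xs.drop (u + 1) := drop_idx_cons hu
  have htk : (xs.take u).count '"' = 0 := by
    rw [List.count_eq_zero]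
    intro hm
    rw [← htw] at hm
    have := List.mem_takeWhile_imp hm
    simp at this
  conv_lhs => rw [hx, hdu]
  rw [List.count_append, htk, List.count_cons_self, h2]

theorem drop_add (t : List Char) (a b : Nat) : (t.drop a).drop b = t.drop (a + b) := by
  rw [List.drop_drop]

theorem getElem?_some_lt {xs : List Char} {u : Nat} {a : Char} (h : xs[u]? = some a) :
    u < xs.length := by
  by_contra hge
  rw [List.getElem?_eq_none (by omega)] at h
  simp at h

-- the main loop invariant: A's loop from `start` computes B's scan of the suffix
theorem loopA_eq (t m : List Char) :
    ∀ fuel start vals, start ≤ t.length → t.length + 1 ≤ start + fuel →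
      pvLoopA t m fuel vals start = vals ++ pvFindAll m (t.drop start) := by
  intro fuel
  induction fuel with
  | zero => intro start vals h1 h2; omega
  | succ fuel ih =>
    intro start vals h1 h2
    simp only [pvLoopA]
    by_cases hf : PySem.Chars.find (t.drop start) m = -1
    · have hni : ¬ m <:+: t.drop start := (PySem.Chars.find_eq_neg_one_iff _ _).mp hf
      have hA : PySem.Chars.findFrom t m (start : Int) = -1 := by
        rw [PySem.Chars.findFrom_natCast t m start h1, hf]; simp
      rw [pvFindAll_eq_nil m (t.drop start) (fun p => pvTryMatch_none_of_not_prefix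
        (fun hp => hni (prefix_drop_infix hp)))]
      simp [hA]
    · have hf0 : 0 ≤ PySem.Chars.find (t.drop start) m := by
        have := PySem.Chars.neg_one_le_find (t.drop start) m
        omega
      obtain ⟨j, hj⟩ : ∃ j : Nat, PySem.Chars.find (t.drop start) m = (j : Int) :=
        ⟨_, (Int.toNat_of_nonneg hf0).symm⟩
      obtain ⟨hpre0, hminj0⟩ := PySem.Chars.find_spec hf0
      rw [hj] at hpre0 hminj0
      simp only [Int.toNat_natCast] at hpre0 hminj0
      have hpre : m <+: t.drop (start + j) := by rwa [drop_add] at hpre0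
      have hjlen : start + j ≤ t.length := by
        have hle := PySem.Chars.find_le_length (t.drop start) m
        rw [hj] at hle
        simp only [List.length_drop] at hle
        omega
      have hK2 : start + j + m.length ≤ t.length := by
        have hl := hpre.length_le
        simp only [List.length_drop] at hl
        omega
      have hA : PySem.Chars.findFrom t m (start : Int) = ((start + j : Nat) : Int) := by
        rw [PySem.Chars.findFrom_natCast t m start h1, hj, if_neg (by omega)]
        push_cast; ring
      rw [hA, if_neg (by omega)]
      have hc2 : ((start + j : Nat) : Int) + (m.length : Int)
          = ((start + j + m.length : Nat) : Int) := by push_cast; ring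
      rw [hc2]
      by_cases hq1 : PySem.Chars.find (t.drop (start + j + m.length)) ['"'] = -1
      · have hB : PySem.Chars.findFrom t ['"'] ((start + j + m.length : Nat) : Int) = -1 := by
          rw [PySem.Chars.findFrom_natCast t ['"'] _ hK2, hq1]; simp
        rw [hB, if_pos (by omega)]
        rw [pvFindAll_eq_nil m (t.drop start) ?_, List.append_nil]
        intro p
        by_cases hp : p < j
        · exact pvTryMatch_none_of_not_prefix (hminj0 p hp)
        · cases htm : pvTryMatch m ((t.drop start).drop p) with
          | none => rfl
          | some x =>
            exfalso
            have h2q := pvTryMatch_some_two_quotes htm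
            rw [drop_add, drop_add,
              show start + (p + m.length) = start + p + m.length from by omega] at h2q
            have hsuf : t.drop (start + p + m.length)
                = (t.drop (start + j + m.length)).drop (p - j) := by
              rw [drop_add]; congr 1; omega
            have hcount : (t.drop (start + p + m.length)).count '"'
                ≤ (t.drop (start + j + m.length)).count '"' := by
              rw [hsuf]; exact (List.drop_sublist _ _).count_le _
            have hz := count_quote_zero hq1
            omega
      · have hq10 : 0 ≤ PySem.Chars.find (t.drop (start + j + m.length)) ['"'] := by
          have := PySem.Chars.neg_one_le_find (t.drop (start + j + m.length)) ['"']
          omega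
        obtain ⟨u, hu⟩ : ∃ u : Nat,
            PySem.Chars.find (t.drop (start + j + m.length)) ['"'] = (u : Int) :=
          ⟨_, (Int.toNat_of_nonneg hq10).symm⟩
        obtain ⟨huq, humin⟩ := quote_facts _ hu
        have hltu : start + j + m.length + u < t.length := by
          have := getElem?_some_lt huq
          simp only [List.length_drop] at this
          omega
        have hB : PySem.Chars.findFrom t ['"'] ((start + j + m.length : Nat) : Int)
            = ((start + j + m.length + u : Nat) : Int) := by
          rw [PySem.Chars.findFrom_natCast t ['"'] _ hK2, hu, if_neg (by omega)]
          push_cast; ring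
        rw [hB, if_neg (by omega)]
        have hc3 : ((start + j + m.length + u : Nat) : Int) + 1
            = ((start + j + m.length + u + 1 : Nat) : Int) := by push_cast; ring
        rw [hc3]
        by_cases hq2 : PySem.Chars.find (t.drop (start + j + m.length + u + 1)) ['"'] = -1
        · have hC : PySem.Chars.findFrom t ['"'] ((start + j + m.length + u + 1 : Nat) : Int)
              = -1 := by
            rw [PySem.Chars.findFrom_natCast t ['"'] _ (by omega), hq2]; simp
          rw [hC, if_pos (by omega)]
          rw [pvFindAll_eq_nil m (t.drop start) ?_, List.append_nil]
          intro p
          by_cases hp : p < j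
          · exact pvTryMatch_none_of_not_prefix (hminj0 p hp)
          · cases htm : pvTryMatch m ((t.drop start).drop p) with
            | none => rfl
            | some x =>
              exfalso
              have h2q := pvTryMatch_some_two_quotes htm
              rw [drop_add, drop_add,
                show start + (p + m.length) = start + p + m.length from by omega] at h2q
              have hsuf : t.drop (start + p + m.length)
                  = (t.drop (start + j + m.length)).drop (p - j) := by
                rw [drop_add]; congr 1; omega
              have hcount : (t.drop (start + p + m.length)).count '"'
                  ≤ (t.drop (start + j + m.length)).count '"' := by
                rw [hsuf]; exact (List.drop_sublist _ _).count_le _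
              have hone : (t.drop (start + j + m.length)).count '"' = 1 := by
                refine count_quote_one huq humin ?_
                rw [drop_add]
                exact count_quote_zero hq2
              omega
        · have hq20 : 0 ≤ PySem.Chars.find (t.drop (start + j + m.length + u + 1)) ['"'] := by
            have := PySem.Chars.neg_one_le_find (t.drop (start + j + m.length + u + 1)) ['"']
            omega
          obtain ⟨v, hv⟩ : ∃ v : Nat,
              PySem.Chars.find (t.drop (start + j + m.length + u + 1)) ['"'] = (v : Int) :=
            ⟨_, (Int.toNat_of_nonneg hq20).symm⟩
          obtain ⟨hvq, hvmin⟩ := quote_facts _ hv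
          have hltv : start + j + m.length + u + 1 + v < t.length := by
            have := getElem?_some_lt hvq
            simp only [List.length_drop] at this
            omega
          have hC : PySem.Chars.findFrom t ['"'] ((start + j + m.length + u + 1 : Nat) : Int)
              = ((start + j + m.length + u + 1 + v : Nat) : Int) := by
            rw [PySem.Chars.findFrom_natCast t ['"'] _ (by omega), hv, if_neg (by omega)]
            push_cast; ring
          rw [hC, if_neg (by omega), Int.toNat_natCast]
          rw [PySem.Chars.slice_eq_listSlice, PySem.List.slice_natCast]
          have hc6 : start + j + m.length + u + 1 + v - (start + j + m.length + u + 1) = v := by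
            omega
          rw [hc6]
          rw [ih (start + j + m.length + u + 1 + v + 1) _ (by omega) (by omega)]
          have htm : pvTryMatch m (t.drop (start + j)) =
              some ((t.drop (start + j + m.length + u + 1)).take v,
                    t.drop (start + j + m.length + u + 1 + v + 1)) := by
            unfold pvTryMatch
            rw [if_pos (List.isPrefixOf_iff_prefix.mpr hpre)]
            rw [drop_add]
            have hdw1 : (t.drop (start + j + m.length)).dropWhile (fun c => c ≠ '"')
                = '"' :: t.drop (start + j + m.length + u + 1) := by
              rw [(tw_dw _ u huq humin).2, drop_idx_cons huq, drop_add]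
              simp [Nat.add_assoc]
            simp only [hdw1]
            have hdw2 : (t.drop (start + j + m.length + u + 1)).dropWhile (fun c => c ≠ '"')
                = '"' :: t.drop (start + j + m.length + u + 1 + v + 1) := by
              rw [(tw_dw _ v hvq hvmin).2, drop_idx_cons hvq, drop_add]
              simp [Nat.add_assoc]
            simp only [hdw2]
            rw [(tw_dw _ v hvq hvmin).1]
          rw [pvFindAll_skip m j (t.drop start) (fun i hi => hminj0 i hi), drop_add,
            pvFindAll_some htm]
          simp

-- ===== VERDICT (by name: the statement is the Claim_ definition above) =====
theorem quoted_terms_after_py_spec : Claim_equal_quoted_terms_after_py := by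
  intro text marker _
  unfold Spec_quoted_terms_after_py quoted_terms_after_py quoted_terms_after_py_alt
  rw [loopA_eq text.toList marker.toList (text.toList.length + 1) 0 [] (by omega) (by omega)]
  simp
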